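-- pv_equiv track=rewrite | github.com/acmeism/RosettaCodeData | Task/Anagrams-Deranged-anagrams/Python/anagrams-deranged-anagrams-2.py | longest_deranged_anagram
-- ===== SOURCE A (Python) =====
-- from collections import defaultdict
-- from itertools import combinations
-- from typing import (Callable,
--                     Dict,
--                     Iterable,
--                     Iterator,
--                     List,
--                     Optional,
--                     Tuple,
--                     TypeVar)
--
-- T1 = TypeVar('T1')
--
-- T2 = TypeVar('T2')
--
-- def longest_deranged_anagram(words: Iterable[str]
--                              ) -> Optional[Tuple[str, str]]:
--     """
--     Returns the longest pair of words
--     that have no character in the same position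
--     """
--     words_by_lengths = mapping_by_function(len, words)
--     decreasing_lengths = sorted(words_by_lengths, reverse=True)
--     for length in decreasing_lengths:
--         words = words_by_lengths[length]
--         anagrams_by_letters = mapping_by_function(sort_str, words)
--         for anagrams in anagrams_by_letters.values():
--             deranged_pair = next(deranged_word_pairs(anagrams), None)
--             if deranged_pair is not None:
--                 return deranged_pair
--     return None
--
-- def mapping_by_function(function: Callable[..., T2],
--                         iterable: Iterable[T1]) -> Dict[T2, List[T1]]:
--     """
--     Constructs a dictionary with keys
--     obtained from applying an input function
--     to items of an iterable,
--     and the values filled from the same iterable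
--     """
--     mapping = defaultdict(list)
--     for item in iterable:
--         mapping[function(item)].append(item)
--     return mapping
--
-- def sort_str(string: str) -> str:
--     """Sorts input string alphabetically"""
--     return ''.join(sorted(string))
--
-- def deranged_word_pairs(words: Iterable[str]) -> Iterator[Tuple[str, str]]:
--     """Yields deranged words from an input list of words"""
--     pairs = combinations(words, 2)  # type: Iterator[Tuple[str, str]]
--     yield from filter(is_deranged, pairs)
--
-- def is_deranged(word_pair: Tuple[str, str]) -> bool:
--     """
--     Checks if all corresponding letters are different,
--     assuming that words have the same length
--     """
--     return all(a != b for a, b in zip(*word_pair))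
-- ===== SOURCE B (Python) =====
-- from itertools import combinations
--
--
-- def longest_deranged_anagram(words):
--     """
--     Returns the longest pair of words
--     that have no character in the same position
--     """
--     groups = {}
--     for word in words:
--         groups.setdefault(''.join(sorted(word)), []).append(word)
--     best = None
--     for signature, anagrams in groups.items():
--         pair = next((p for p in combinations(anagrams, 2)
--                      if all(a != b for a, b in zip(*p))), None)
--         if pair is not None and (best is None or len(signature) > len(best[0])):
--             best = pair
--     return best
-- ===== Notes on version B (the rewrite author's own statement) =====
-- stated objective: simpler
-- what changed: Replaces the length-dict plus descending sort of lengths plus per-length signature-dicts with a single signature-grouping pass and one best-so-far scan over the groups (strict-greater replacement keeps the first group of maximal length), with no sorting at all.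
import Mathlib
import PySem

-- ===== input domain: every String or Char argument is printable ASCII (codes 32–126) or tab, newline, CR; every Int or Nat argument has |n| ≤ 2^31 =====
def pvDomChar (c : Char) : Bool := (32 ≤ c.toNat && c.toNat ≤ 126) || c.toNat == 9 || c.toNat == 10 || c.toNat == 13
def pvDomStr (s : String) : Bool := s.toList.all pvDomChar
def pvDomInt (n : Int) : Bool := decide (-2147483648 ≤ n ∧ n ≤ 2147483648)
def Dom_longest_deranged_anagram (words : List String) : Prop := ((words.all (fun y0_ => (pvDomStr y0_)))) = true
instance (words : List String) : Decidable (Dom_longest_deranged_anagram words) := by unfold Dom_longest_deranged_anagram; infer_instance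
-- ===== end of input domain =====

-- B replaces A's length-dict + descending sort + per-length signature-dicts by one signature-grouping
-- pass and a single best-so-far scan over the groups (objective: simpler).

-- ===== PORT A =====
-- sort_str(string) = ''.join(sorted(string))
def pvSortStr (s : String) : String := String.ofList (PySem.List.sorted s.toList (fun c => c) false)

-- is_deranged(word_pair) = all(a != b for a, b in zip(*word_pair))
def pvIsDeranged (p : String × String) : Bool := (p.1.toList.zip p.2.toList).all (fun q => q.1 != q.2)

-- itertools.combinations(words, 2), as pairs in CPython's order (ported by hand: exact for r = 2)
def pvCombos2 : List String → List (String × String)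
  | [] => []
  | x :: xs => xs.map (fun y => (x, y)) ++ pvCombos2 xs

-- mapping_by_function(function, iterable) — defaultdict(list) accumulation
def pvMapBy {κ : Type} [BEq κ] (f : String → κ) (ws : List String) : PySem.Dict κ (List String) :=
  ws.foldl (fun d w => d.modify (f w) [] (fun l => l ++ [w])) PySem.Dict.empty

-- inner 'for anagrams in anagrams_by_letters.values()' with early return
def pvFirstDeranged : List (List String) → Option (String × String)
  | [] => none
  | g :: rest =>
    match ((pvCombos2 g).filter pvIsDeranged).head? with  -- next(deranged_word_pairs(g), None)
    | some p => some p
    | none => pvFirstDeranged rest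

-- outer 'for length in decreasing_lengths' with early return
def pvLoopA (d : PySem.Dict Int (List String)) : List Int → Option (String × String)
  | [] => none
  | L :: rest =>
    match pvFirstDeranged (pvMapBy pvSortStr (d.getD L [])).values with
    | some p => some p
    | none => pvLoopA d rest

def longest_deranged_anagram (words : List String) : Option (String × String) :=
  let words_by_lengths := pvMapBy PySem.Str.len words
  let decreasing_lengths := PySem.List.sorted words_by_lengths.keys (fun x => x) true
  pvLoopA words_by_lengths decreasing_lengths

-- ===== PORT B =====
-- next((p for p in combinations(anagrams, 2) if all(a != b for a, b in zip(*p))), None)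
def pvFirstPair (ws : List String) : Option (String × String) :=
  (pvCombos2 ws).find? pvIsDeranged

-- 'for signature, anagrams in groups.items(): …' tracking the best pair so far
def pvBestLoop : Option (String × String) → List (String × List String) → Option (String × String)
  | best, [] => best
  | best, (sig, anagrams) :: rest =>
    match pvFirstPair anagrams with
    | none => pvBestLoop best rest
    | some p =>
      match best with
      | none => pvBestLoop (some p) rest
      | some b =>
        if PySem.Str.len sig > PySem.Str.len b.1 then pvBestLoop (some p) rest
        else pvBestLoop (some b) rest

def longest_deranged_anagram_alt (words : List String) : Option (String × String) :=
  let groups := pvMapBy pvSortStr words   -- groups.setdefault(''.join(sorted(word)), []).append(word)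
  pvBestLoop none groups.items

-- ===== PRECONDITION & SPEC =====
def Spec_longest_deranged_anagram (words : List String) (out : Option (String × String)) : Prop := out = longest_deranged_anagram_alt words
instance (words : List String) (out : Option (String × String)) : Decidable (Spec_longest_deranged_anagram words out) := by unfold Spec_longest_deranged_anagram; infer_instance

-- ===== CLAIM (what is proved, stated in full; the proofs are below) =====
def Claim_equal_longest_deranged_anagram : Prop := ∀ (words : List String), Dom_longest_deranged_anagram words → Spec_longest_deranged_anagram words (longest_deranged_anagram words)

-- ===== LEMMAS AND PROOFS =====

-- pair search over one signature group, and the group of a signature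
def pvFP (words : List String) (sig : String) : Option (String × String) :=
  (pvCombos2 (words.filter (fun w => pvSortStr w == sig))).find? pvIsDeranged

-- proof-side fold: best-so-far over (key, value) pairs, strict-greater replacement
def pvFoldMax {P : Type} : Option (Int × P) → List (Int × P) → Option (Int × P)
  | acc, [] => acc
  | acc, p :: rest =>
    match acc with
    | none => pvFoldMax (some p) rest
    | some b => if p.1 > b.1 then pvFoldMax (some p) rest else pvFoldMax (some b) rest

-- candidates: signatures that have a deranged pair, tagged with their length
def pvPS (words : List String) (S : List String) : List (Int × (String × String)) :=
  S.filterMap (fun sig => (pvFP words sig).map (fun p => (PySem.Str.len sig, p)))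


-- (l.foldl Set.add …) appends first occurrences: dedup of a snoc
theorem pv_dedup_snoc {α : Type} [BEq α] [LawfulBEq α] (l : List α) (x : α) :
    PySem.List.dedup (l ++ [x]) = if x ∈ l then PySem.List.dedup l else PySem.List.dedup l ++ [x] := by
  have h : PySem.List.dedup (l ++ [x]) = PySem.Set.add (PySem.List.dedup l) x := by
    show (l ++ [x]).foldl PySem.Set.add [] = _
    rw [List.foldl_append]; rfl
  rw [h]
  show (if (PySem.List.dedup l).contains x then PySem.List.dedup l else PySem.List.dedup l ++ [x]) = _
  by_cases hx : x ∈ l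
  · have : (PySem.List.dedup l).contains x = true := by
      simpa [List.contains_iff_mem, PySem.List.mem_dedup] using hx
    simp [hx]
  · have : (PySem.List.dedup l).contains x = false := by
      simpa [List.contains_iff_mem, PySem.List.mem_dedup] using hx
    simp [hx]

theorem keys_pvMapBy {κ : Type} [BEq κ] [LawfulBEq κ] (f : String → κ) (ws : List String) :
    (pvMapBy f ws).keys = PySem.List.dedup (ws.map f) := by
  unfold pvMapBy
  rw [PySem.Dict.keys_foldl_modify_key ws f ([] : List String) (fun _ w => fun l => l ++ [w])]
  rfl

theorem getD_pvMapBy {κ : Type} [BEq κ] [LawfulBEq κ] (f : String → κ) (ws : List String) (k : κ) :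
    (pvMapBy f ws).getD k [] = ws.filter (fun w => f w == k) := by
  have h : pvMapBy f ws
      = (ws.map (fun w => (f w, w))).foldl (fun d p => d.modify p.1 [] (fun l => l ++ [p.2])) PySem.Dict.empty := by
    rw [List.foldl_map]; rfl
  rw [h, PySem.Dict.getD_foldl_modify_append]
  rw [List.filter_map]
  simp [List.map_map, Function.comp_def]

theorem items_pvMapBy {κ : Type} [BEq κ] [LawfulBEq κ] (f : String → κ) (ws : List String) :
    (pvMapBy f ws).items
      = (PySem.List.dedup (ws.map f)).map (fun k => (k, ws.filter (fun w => f w == k))) := by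
  induction ws using List.reverseRecOn with
  | nil => rfl
  | append_singleton l x ih =>
    have hstep : pvMapBy f (l ++ [x])
        = (pvMapBy f l).insert (f x) ((pvMapBy f l).getD (f x) [] ++ [x]) := by
      show (l ++ [x]).foldl _ _ = _
      rw [List.foldl_append]; rfl
    have hkeys : (pvMapBy f l).keys = PySem.List.dedup (l.map f) := keys_pvMapBy f l
    have hfilter : ∀ (k : κ), (l ++ [x]).filter (fun w => f w == k)
        = l.filter (fun w => f w == k) ++ (if f x == k then [x] else []) := by
      intro k; cases h : (f x == k) <;> simp [List.filter_append, List.filter, h]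
    rw [hstep, getD_pvMapBy]
    by_cases hx : f x ∈ l.map f
    · have hcont : (pvMapBy f l).contains (f x) = true := by
        rw [PySem.Dict.contains_iff_mem_keys, hkeys, PySem.List.mem_dedup]; exact hx
      rw [PySem.Dict.items_insert_of_contains _ _ hcont, ih]
      rw [List.map_map]
      have hded : PySem.List.dedup ((l ++ [x]).map f) = PySem.List.dedup (l.map f) := by
        rw [List.map_append, List.map_singleton, pv_dedup_snoc, if_pos hx]
      rw [hded]
      apply List.map_congr_left
      intro k hk
      by_cases hke : k == f x
      · have hke' : k = f x := by simpa using hke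
        simp only [Function.comp_apply, hke, if_pos]
        rw [hfilter, hke']
        simp
      · simp only [Function.comp_apply, hke, if_neg, Bool.false_eq_true, not_false_iff]
        rw [hfilter]
        have : (f x == k) = false := by
          cases h' : (f x == k)
          · rfl
          · exact absurd (by simpa using (beq_iff_eq.mp h').symm) (by simpa using hke)
        simp [this]
    · have hcont : (pvMapBy f l).contains (f x) = false := by
        cases h' : (pvMapBy f l).contains (f x)
        · rfl
        · exact absurd ((PySem.Dict.contains_iff_mem_keys _ _).mp h') (by rw [hkeys, PySem.List.mem_dedup]; exact hx)
      rw [PySem.Dict.items_insert_of_not_contains _ _ hcont, ih]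
      have hded : PySem.List.dedup ((l ++ [x]).map f) = PySem.List.dedup (l.map f) ++ [f x] := by
        rw [List.map_append, List.map_singleton, pv_dedup_snoc, if_neg hx]
      rw [hded, List.map_append, List.map_singleton]
      congr 1
      · apply List.map_congr_left
        intro k hk
        have hk' : k ∈ l.map f := (PySem.List.mem_dedup _ _).mp hk
        have : (f x == k) = false := by
          cases h' : (f x == k)
          · rfl
          · exact absurd (beq_iff_eq.mp h' ▸ hk') hx
        rw [hfilter, this]
        simp
      · rw [hfilter]
        have hnil : l.filter (fun w => f w == f x) = [] := by
          rw [List.filter_eq_nil_iff]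
          intro w hw hbeq
          exact hx (List.mem_map.mpr ⟨w, hw, (beq_iff_eq.mp hbeq)⟩)
        simp [hnil]

theorem len_pvSortStr (s : String) : PySem.Str.len (pvSortStr s) = PySem.Str.len s := by
  unfold pvSortStr
  rw [PySem.Str.len_eq, PySem.Str.len_eq, String.toList_ofList]
  rw [PySem.List.length_sorted]

theorem pv_length_sortStr (s : String) : (pvSortStr s).length = s.length := by
  have h := len_pvSortStr s
  rw [PySem.Str.len_eq, PySem.Str.len_eq] at h
  rw [String.length_toList] at *
  exact_mod_cast h

theorem mem_pvCombos2 (l : List String) (p : String × String) (h : p ∈ pvCombos2 l) :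
    p.1 ∈ l ∧ p.2 ∈ l := by
  induction l with
  | nil => simp [pvCombos2] at h
  | cons x xs ih =>
    simp only [pvCombos2, List.mem_append, List.mem_map] at h
    rcases h with ⟨y, hy, hp⟩ | h
    · subst hp; exact ⟨List.mem_cons_self, List.mem_cons_of_mem _ hy⟩
    · rcases ih h with ⟨h1, h2⟩
      exact ⟨List.mem_cons_of_mem _ h1, List.mem_cons_of_mem _ h2⟩

theorem pvFP_len (words : List String) (sig : String) (p : String × String)
    (h : pvFP words sig = some p) : PySem.Str.len p.1 = PySem.Str.len sig := by
  have hmem : p ∈ pvCombos2 (words.filter (fun w => pvSortStr w == sig)) :=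
    List.mem_of_find?_eq_some h
  have h1 : p.1 ∈ words.filter (fun w => pvSortStr w == sig) := (mem_pvCombos2 _ _ hmem).1
  have h2 : pvSortStr p.1 = sig := by
    have := (List.mem_filter.mp h1).2
    simpa using this
  rw [← h2, len_pvSortStr]

theorem pv_findSome?_congr_mem {α β : Type} (l : List α) (f g : α → Option β)
    (h : ∀ x ∈ l, f x = g x) : l.findSome? f = l.findSome? g := by
  induction l with
  | nil => rfl
  | cons x xs ih =>
    rw [List.findSome?_cons, List.findSome?_cons, h x List.mem_cons_self]
    cases g x with
    | none => exact ih (fun y hy => h y (List.mem_cons_of_mem _ hy))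
    | some v => rfl

theorem pv_dedup_filter {α : Type} [BEq α] [LawfulBEq α] (l : List α) (q : α → Bool) :
    PySem.List.dedup (l.filter q) = (PySem.List.dedup l).filter q := by
  induction l using List.reverseRecOn with
  | nil => rfl
  | append_singleton l x ih =>
    rw [List.filter_append, pv_dedup_snoc]
    by_cases hq : q x = true
    · simp only [List.filter, hq]
      rw [pv_dedup_snoc, ih]
      by_cases hx : x ∈ l
      · rw [if_pos hx, if_pos (List.mem_filter.mpr ⟨hx, hq⟩)]
      · rw [if_neg hx, if_neg (fun hc => hx (List.mem_filter.mp hc).1), List.filter_append]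
        simp [List.filter, hq]
    · simp only [List.filter, hq]
      rw [List.append_nil, ih]
      by_cases hx : x ∈ l
      · rw [if_pos hx]
      · rw [if_neg hx, List.filter_append]
        simp [List.filter, hq]

theorem pv_filter_filter_len (ws : List String) (sig : String) (L : Int)
    (hL : PySem.Str.len sig = L) :
    (ws.filter (fun w => PySem.Str.len w == L)).filter (fun w => pvSortStr w == sig)
      = ws.filter (fun w => pvSortStr w == sig) := by
  rw [List.filter_filter]
  apply List.filter_congr
  intro w _
  cases hs : (pvSortStr w == sig)
  · simp
  · have : pvSortStr w = sig := by simpa using hs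
    have hlen : PySem.Str.len w = L := by rw [← hL, ← this, len_pvSortStr]
    rw [PySem.Str.len_eq, String.length_toList] at hlen
    simp [hlen]

theorem pvFirstDeranged_eq (gs : List (List String)) :
    pvFirstDeranged gs = gs.findSome? (fun g => (pvCombos2 g).find? pvIsDeranged) := by
  induction gs with
  | nil => rfl
  | cons g rest ih =>
    rw [List.findSome?_cons]
    show (match ((pvCombos2 g).filter pvIsDeranged).head? with
          | some p => some p | none => pvFirstDeranged rest) = _
    rw [List.head?_filter]
    cases (pvCombos2 g).find? pvIsDeranged with
    | none => exact ih
    | some p => rfl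

theorem pvLoopA_eq (d : PySem.Dict Int (List String)) (lens : List Int) :
    pvLoopA d lens
      = lens.findSome? (fun L => pvFirstDeranged (pvMapBy pvSortStr (d.getD L [])).values) := by
  induction lens with
  | nil => rfl
  | cons L rest ih =>
    rw [List.findSome?_cons]
    show (match pvFirstDeranged (pvMapBy pvSortStr (d.getD L [])).values with
          | some p => some p | none => pvLoopA d rest) = _
    cases pvFirstDeranged (pvMapBy pvSortStr (d.getD L [])).values with
    | none => exact ih
    | some p => rfl

-- the per-length inner search, rewritten over the global signature list
theorem pv_innerA (words : List String) (L : Int) :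
    pvFirstDeranged (pvMapBy pvSortStr (words.filter (fun w => PySem.Str.len w == L))).values
      = ((PySem.List.dedup (words.map pvSortStr)).filter (fun s => PySem.Str.len s == L)).findSome?
          (pvFP words) := by
  set wsL := words.filter (fun w => PySem.Str.len w == L) with hwsL
  have hv : (pvMapBy pvSortStr wsL).values
      = (PySem.List.dedup (wsL.map pvSortStr)).map
          (fun k => (wsL.filter (fun w => pvSortStr w == k))) := by
    show (pvMapBy pvSortStr wsL).items.map (·.2) = _
    rw [items_pvMapBy, List.map_map]
    rfl
  rw [pvFirstDeranged_eq, hv, List.findSome?_map]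
  have h9 : wsL.map pvSortStr = (words.map pvSortStr).filter (fun s => PySem.Str.len s == L) := by
    rw [List.filter_map]
    rw [hwsL]
    congr 1
    apply List.filter_congr
    intro w _
    simp [Function.comp_apply, pv_length_sortStr]
  have h8 : PySem.List.dedup (wsL.map pvSortStr)
      = (PySem.List.dedup (words.map pvSortStr)).filter (fun s => PySem.Str.len s == L) := by
    rw [h9, pv_dedup_filter]
  rw [h8]
  apply pv_findSome?_congr_mem
  intro k hk
  have hkL : PySem.Str.len k = L := by
    have := (List.mem_filter.mp hk).2
    simpa using this
  show (pvCombos2 (wsL.filter (fun w => pvSortStr w == k))).find? pvIsDeranged = pvFP words k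
  rw [hwsL, pv_filter_filter_len words k L hkL]
  rfl

theorem pv_filter_findSome?_fp (words : List String) (S : List String) (L : Int) :
    (S.filter (fun s => PySem.Str.len s == L)).findSome? (pvFP words)
      = ((pvPS words S).find? (fun p => p.1 == L)).map Prod.snd := by
  induction S with
  | nil => rfl
  | cons t S ih =>
    have hps : pvPS words (t :: S)
        = (match pvFP words t with
           | none => pvPS words S
           | some p => (PySem.Str.len t, p) :: pvPS words S) := by
      cases hfp : pvFP words t <;> simp [pvPS, hfp]
    rw [List.filter_cons]
    cases hfp : pvFP words t with
    | none =>
      rw [hps, hfp]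
      cases hL : (PySem.Str.len t == L) with
      | false => rw [if_neg (by simp)]; exact ih
      | true =>
        rw [if_pos (by simp), List.findSome?_cons, hfp]
        exact ih
    | some p =>
      rw [hps, hfp, List.find?_cons]
      cases hL : (PySem.Str.len t == L) with
      | false =>
        rw [if_neg (by simp)]
        exact ih
      | true =>
        rw [if_pos (by simp), List.findSome?_cons, hfp]
        rfl

theorem pvFoldMax_stay {P : Type} (ps : List (Int × P)) (L : Int) (b : Int × P)
    (hle : ∀ p ∈ ps, p.1 ≤ L) (hb : b.1 = L) : pvFoldMax (some b) ps = some b := by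
  induction ps with
  | nil => rfl
  | cons p ps ih =>
    show (if p.1 > b.1 then pvFoldMax (some p) ps else pvFoldMax (some b) ps) = some b
    have hle1 : p.1 ≤ L := hle p List.mem_cons_self
    rw [if_neg (by omega)]
    exact ih (fun q hq => hle q (List.mem_cons_of_mem _ hq))

theorem pvFoldMax_find {P : Type} (ps : List (Int × P)) (L : Int) (p0 : Int × P)
    (hle : ∀ p ∈ ps, p.1 ≤ L) (hfind : ps.find? (fun p => p.1 == L) = some p0)
    (acc : Option (Int × P)) (hacc : ∀ b, acc = some b → b.1 < L) :
    pvFoldMax acc ps = some p0 := by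
  induction ps generalizing acc with
  | nil => simp at hfind
  | cons p ps ih =>
    have hle1 : p.1 ≤ L := hle p List.mem_cons_self
    have hletl : ∀ q ∈ ps, q.1 ≤ L := fun q hq => hle q (List.mem_cons_of_mem _ hq)
    cases hp : (p.1 == L) with
    | true =>
      have hpL : p.1 = L := by simpa using hp
      have hp0 : p = p0 := by
        rw [List.find?_cons, hp] at hfind
        simpa using hfind
      subst hp0
      cases acc with
      | none =>
        show pvFoldMax (some p) ps = some p
        exact pvFoldMax_stay ps L p hletl hpL
      | some b =>
        have hb : b.1 < L := hacc b rfl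
        show (if p.1 > b.1 then pvFoldMax (some p) ps else pvFoldMax (some b) ps) = some p
        rw [if_pos (by omega)]
        exact pvFoldMax_stay ps L p hletl hpL
    | false =>
      have hpL : p.1 < L := by
        have : p.1 ≠ L := by simpa using hp
        omega
      have hfind' : ps.find? (fun q => q.1 == L) = some p0 := by
        rw [List.find?_cons, hp] at hfind
        exact hfind
      cases acc with
      | none =>
        show pvFoldMax (some p) ps = some p0
        exact ih hletl hfind' (some p) (fun b hb => by cases hb; exact hpL)
      | some b =>
        have hb : b.1 < L := hacc b rfl
        show (if p.1 > b.1 then pvFoldMax (some p) ps else pvFoldMax (some b) ps) = some p0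
        by_cases hgt : p.1 > b.1
        · rw [if_pos hgt]
          exact ih hletl hfind' (some p) (fun q hq => by cases hq; exact hpL)
        · rw [if_neg hgt]
          exact ih hletl hfind' (some b) (fun q hq => by cases hq; exact hb)

theorem pv_abs {P : Type} (lens : List Int) (ps : List (Int × P))
    (hdesc : lens.Pairwise (· > ·)) (hsub : ∀ p ∈ ps, p.1 ∈ lens) :
    lens.findSome? (fun L => (ps.find? (fun p => p.1 == L)).map Prod.snd)
      = (pvFoldMax none ps).map Prod.snd := by
  induction lens with
  | nil =>
    have : ps = [] := List.eq_nil_iff_forall_not_mem.mpr (fun p hp => by simpa using hsub p hp)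
    subst this
    rfl
  | cons L rest ih =>
    have hL : ∀ x ∈ rest, L > x := fun x hx => (List.pairwise_cons.mp hdesc).1 x hx
    have hdesc' : rest.Pairwise (· > ·) := (List.pairwise_cons.mp hdesc).2
    have hle : ∀ p ∈ ps, p.1 ≤ L := by
      intro p hp
      rcases List.mem_cons.mp (hsub p hp) with h | h
      · omega
      · exact le_of_lt (hL _ h)
    rw [List.findSome?_cons]
    cases hfind : ps.find? (fun p => p.1 == L) with
    | some p0 =>
      have : pvFoldMax (none : Option (Int × P)) ps = some p0 :=
        pvFoldMax_find ps L p0 hle hfind none (fun b hb => by cases hb)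
      rw [this]
      rfl
    | none =>
      have hsub' : ∀ p ∈ ps, p.1 ∈ rest := by
        intro p hp
        rcases List.mem_cons.mp (hsub p hp) with h | h
        · exact absurd (show (p.1 == L) = true by simpa using h)
            (by simpa using List.find?_eq_none.mp hfind p hp)
        · exact h
      simpa using ih hdesc' hsub'

theorem pvBestLoop_bridge (words : List String) (S : List String) (acc : Option (Int × (String × String)))
    (hacc : ∀ b, acc = some b → PySem.Str.len b.2.1 = b.1) :
    pvBestLoop (acc.map Prod.snd) (S.map (fun k => (k, words.filter (fun w => pvSortStr w == k))))
      = (pvFoldMax acc (pvPS words S)).map Prod.snd := by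
  induction S generalizing acc with
  | nil =>
    show acc.map Prod.snd = (pvFoldMax acc []).map Prod.snd
    rfl
  | cons k S ih =>
    rw [List.map_cons]
    show pvBestLoop (acc.map Prod.snd) ((k, words.filter (fun w => pvSortStr w == k)) :: _) = _
    have hfpeq : pvFirstPair (words.filter (fun w => pvSortStr w == k)) = pvFP words k := rfl
    cases hfp : pvFP words k with
    | none =>
      have hps : pvPS words (k :: S) = pvPS words S := by
        simp [pvPS, hfp]
      rw [hps]
      show (match pvFirstPair (words.filter (fun w => pvSortStr w == k)) with
            | none => pvBestLoop (acc.map Prod.snd) (S.map _)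
            | some p => match acc.map Prod.snd with
              | none => pvBestLoop (some p) (S.map _)
              | some b => if PySem.Str.len k > PySem.Str.len b.1 then pvBestLoop (some p) (S.map _)
                          else pvBestLoop (some b) (S.map _)) = _
      rw [hfpeq, hfp]
      exact ih acc hacc
    | some p =>
      have hps : pvPS words (k :: S) = (PySem.Str.len k, p) :: pvPS words S := by
        simp [pvPS, hfp]
      rw [hps]
      have hplen : PySem.Str.len p.1 = PySem.Str.len k := pvFP_len words k p hfp
      cases acc with
      | none =>
        show (match pvFirstPair (words.filter (fun w => pvSortStr w == k)) with
              | none => pvBestLoop none (S.map _)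
              | some q => pvBestLoop (some q) (S.map _)) = _
        rw [hfpeq, hfp]
        have := ih (some (PySem.Str.len k, p)) (fun b hb => by cases hb; exact hplen)
        simpa using this
      | some b =>
        have hblen : PySem.Str.len b.2.1 = b.1 := hacc b rfl
        show (match pvFirstPair (words.filter (fun w => pvSortStr w == k)) with
              | none => pvBestLoop (some b.2) (S.map _)
              | some q =>
                  if PySem.Str.len k > PySem.Str.len b.2.1 then pvBestLoop (some q) (S.map _)
                  else pvBestLoop (some b.2) (S.map _)) = _
        rw [hfpeq, hfp, hblen]
        show (if PySem.Str.len k > b.1 then pvBestLoop (some p) (S.map _)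
              else pvBestLoop (some b.2) (S.map _)) = (pvFoldMax (some b) _).map Prod.snd
        show _ = (if (PySem.Str.len k, p).1 > b.1 then pvFoldMax (some (PySem.Str.len k, p)) (pvPS words S)
                  else pvFoldMax (some b) (pvPS words S)).map Prod.snd
        by_cases hgt : PySem.Str.len k > b.1
        · rw [if_pos hgt, if_pos hgt]
          have := ih (some (PySem.Str.len k, p)) (fun q hq => by cases hq; exact hplen)
          simpa using this
        · rw [if_neg hgt, if_neg hgt]
          have := ih (some b) (fun q hq => by cases hq; exact hblen)
          simpa using this

theorem pv_lens_desc (l : List Int) :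
    (PySem.List.sorted (PySem.List.dedup l) (fun x => x) true).Pairwise (· > ·) := by
  have h1 : (PySem.List.sorted (PySem.List.dedup l) (fun x => x) true).Pairwise
      (fun a b => (fun x => x) b ≤ (fun x => x) a) :=
    PySem.List.sorted_pairwise_rev (PySem.List.dedup l) (fun x => x)
  have h2 : (PySem.List.sorted (PySem.List.dedup l) (fun x => x) true).Nodup :=
    (PySem.List.sorted_perm (PySem.List.dedup l) (fun x => x) true).symm.nodup
      (PySem.List.nodup_dedup l)
  refine (h1.and h2).imp ?_
  intro a b h
  obtain ⟨hle, hne⟩ := h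
  simp only at hle
  omega

theorem longest_deranged_anagram_spec : Claim_equal_longest_deranged_anagram := by
  intro words _hdom
  unfold Spec_longest_deranged_anagram
  show longest_deranged_anagram words = longest_deranged_anagram_alt words
  unfold longest_deranged_anagram longest_deranged_anagram_alt
  rw [pvLoopA_eq, keys_pvMapBy]
  have hcongr : ∀ L ∈ PySem.List.sorted (PySem.List.dedup (words.map PySem.Str.len)) (fun x => x) true,
      pvFirstDeranged (pvMapBy pvSortStr ((pvMapBy PySem.Str.len words).getD L [])).values
        = ((pvPS words (PySem.List.dedup (words.map pvSortStr))).find? (fun p => p.1 == L)).map Prod.snd := by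
    intro L _
    rw [getD_pvMapBy, pv_innerA, pv_filter_findSome?_fp]
  rw [pv_findSome?_congr_mem _ _ _ hcongr]
  have hsub : ∀ p ∈ pvPS words (PySem.List.dedup (words.map pvSortStr)),
      p.1 ∈ PySem.List.sorted (PySem.List.dedup (words.map PySem.Str.len)) (fun x => x) true := by
    intro p hp
    rcases List.mem_filterMap.mp hp with ⟨sig, hsig, hmap⟩
    cases hfp : pvFP words sig with
    | none => rw [hfp] at hmap; simp at hmap
    | some q =>
      rw [hfp] at hmap
      have hp1 : p.1 = PySem.Str.len sig := by
        have : p = (PySem.Str.len sig, q) := by simpa using hmap.symm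
        rw [this]
      rcases List.mem_map.mp ((PySem.List.mem_dedup _ _).mp hsig) with ⟨w, hw, hws⟩
      have : p.1 = PySem.Str.len w := by rw [hp1, ← hws, len_pvSortStr]
      rw [PySem.List.mem_sorted, PySem.List.mem_dedup, this]
      exact List.mem_map.mpr ⟨w, hw, rfl⟩
  rw [pv_abs _ _ (pv_lens_desc _) hsub]
  have hitems : (pvMapBy pvSortStr words).items
      = (PySem.List.dedup (words.map pvSortStr)).map
          (fun k => (k, words.filter (fun w => pvSortStr w == k))) := items_pvMapBy pvSortStr words
  show _ = pvBestLoop none (pvMapBy pvSortStr words).items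
  rw [hitems]
  have := pvBestLoop_bridge words (PySem.List.dedup (words.map pvSortStr)) none (fun b hb => by cases hb)
  simpa using this.symm
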